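-- pv_equiv track=rewrite | github.com/mariops03/DLX-Assembly | SCRIPT.py | find_max_consecutive_evens
-- ===== SOURCE A (Python) =====
-- def collatz_sequence(n):
--     sequence = [n]
--     while n != 1:
--         if n % 2 == 0:
--             n = n // 2
--         else:
--             n = 3 * n + 1
--         sequence.append(n)
--     return sequence
--
-- def find_max_consecutive_evens(start, end):
--     max_length = 0
--     number_with_max_length = 0
--     for i in range(start, end + 1):
--         sequence = collatz_sequence(i)
--         consecutive_evens = 0
--         for number in sequence:
--             if number % 2 == 0:
--                 consecutive_evens += 1
--             else:
--                 if consecutive_evens > max_length: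
--                     max_length = consecutive_evens
--                     number_with_max_length = i
--                 consecutive_evens = 0
--     return number_with_max_length, max_length
-- ===== SOURCE B (Python) =====
-- def find_max_consecutive_evens(start, end):
--     best_len = 0
--     best_num = 0
--     for i in range(start, end + 1):
--         # strip the leading even run of i: i = 2**a * m with m odd
--         a = 0
--         m = i
--         while m % 2 == 0:
--             a += 1
--             m //= 2
--         if a > best_len:
--             best_len = a
--             best_num = i
--         # walk odd values only; each step 3*m+1 starts an even run of
--         # length v2(3*m+1), flushed exactly when the next odd is reached
--         while m != 1:
--             t = 3 * m + 1
--             a = 0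
--             while t % 2 == 0:
--                 a += 1
--                 t //= 2
--             if a > best_len:
--                 best_len = a
--                 best_num = i
--             m = t
--     return best_num, best_len
-- ===== Notes on version B (the rewrite author's own statement) =====
-- stated objective: alternative
-- what changed: B never materializes the Collatz sequences: per number it strips the even part arithmetically and then walks only the odd values of the trajectory, flushing each even-run length v2(3m+1) directly, instead of building each full sequence as a list and re-scanning it with a run counter.
import Mathlib
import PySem

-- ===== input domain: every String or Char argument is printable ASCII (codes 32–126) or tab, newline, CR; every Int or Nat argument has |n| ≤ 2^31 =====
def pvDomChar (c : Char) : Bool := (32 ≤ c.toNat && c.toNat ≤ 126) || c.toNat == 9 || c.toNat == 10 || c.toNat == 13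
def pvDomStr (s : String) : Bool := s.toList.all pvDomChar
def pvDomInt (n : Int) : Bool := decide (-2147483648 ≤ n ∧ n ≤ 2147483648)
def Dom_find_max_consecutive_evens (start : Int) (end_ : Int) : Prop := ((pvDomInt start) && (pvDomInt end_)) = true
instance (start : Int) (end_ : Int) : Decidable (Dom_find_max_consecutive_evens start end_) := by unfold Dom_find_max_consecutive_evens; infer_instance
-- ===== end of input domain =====

-- B avoids building each Collatz sequence as a list: it walks only the odd values
-- of each trajectory, flushing each even-run length directly (alternative algorithm).
-- Both ports carry a fuel bound (1000000) only to be total in Lean; on the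
-- precondition's inputs the Python loops terminate well inside it.

def collatzFuel : Nat := 1000000

-- ===== PORT A =====
-- collatz_sequence: sequence = [n]; while n != 1: n = n//2 or 3n+1; sequence.append(n)
def collatzAux : Nat → Int → List Int
  | fuel, n =>
    if n = 1 then []
    else
      match fuel with
      | 0 => []
      | f + 1 =>
        let n' := if PySem.Int.mod n 2 = 0 then PySem.Int.floordiv n 2 else 3 * n + 1
        n' :: collatzAux f n'

def collatz_sequence (fuel : Nat) (n : Int) : List Int := n :: collatzAux fuel n

-- the body of A's inner 'for number in sequence' loop; state = (max_length, number_with_max_length, consecutive_evens)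
def stepA (i : Int) (s : Int × Int × Int) (num : Int) : Int × Int × Int :=
  if PySem.Int.mod num 2 = 0 then (s.1, s.2.1, s.2.2 + 1)
  else if s.2.2 > s.1 then (s.2.2, i, 0)
  else (s.1, s.2.1, 0)

def find_max_consecutive_evens (start : Int) (end_ : Int) : List Int :=
  let st := (PySem.List.pyRange start (end_ + 1) 1).foldl
    (fun st i =>
      let s := (collatz_sequence collatzFuel i).foldl (stepA i) (st.1, st.2, 0)
      (s.1, s.2.1))
    (0, 0)
  [st.2, st.1]

-- ===== PORT B =====
-- Source B's 'while m % 2 == 0: a += 1; m //= 2' (the m ≠ 0 guard only makes it total; Python diverges at 0)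
def v2strip (m : Int) : Nat × Int :=
  if h : m ≠ 0 ∧ PySem.Int.mod m 2 = 0 then
    let r := v2strip (PySem.Int.floordiv m 2)
    (r.1 + 1, r.2)
  else (0, m)
termination_by m.natAbs
decreasing_by
  obtain ⟨h0, h2⟩ := h
  rw [PySem.Int.floordiv_eq_ediv_of_pos (by omega)]
  obtain ⟨k, hk⟩ := (PySem.Int.mod_eq_zero_iff_dvd m 2).mp h2
  subst hk
  rw [Int.mul_ediv_cancel_left _ (by omega)]
  omega

-- Source B's 'if a > best_len: best_len = a; best_num = i'; state = (best_len, best_num)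
def flushB (i : Int) (a : Int) (st : Int × Int) : Int × Int :=
  if a > st.1 then (a, i) else st

-- Source B's 'while m != 1' loop; fuel decreases by 1 + v2(3m+1) per iteration (the even
-- steps the block stands for), so that exhaustion matches port A's step-counting fuel
def bGo : Nat → Int → Int → Int × Int → Int × Int
  | fuel, m, i, st =>
    if m = 1 then st
    else
      let r := v2strip (3 * m + 1)
      if _h : fuel < r.1 + 1 then st
      else bGo (fuel - (r.1 + 1)) r.2 i (flushB i (r.1 : Int) st)
termination_by fuel => fuel
decreasing_by omega

def find_max_consecutive_evens_alt (start : Int) (end_ : Int) : List Int :=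
  let st := (PySem.List.pyRange start (end_ + 1) 1).foldl
    (fun st i =>
      let r := v2strip i
      if collatzFuel < r.1 then st
      else bGo (collatzFuel - r.1) r.2 i (flushB i (r.1 : Int) st))
    (0, 0)
  [st.2, st.1]

-- ===== PRECONDITION & SPEC =====
-- Pre_ excludes exactly the inputs where A never returns: a nonempty range containing
-- a number ≤ 0 makes collatz_sequence loop forever (0 → 0, negatives cycle).
def Pre_find_max_consecutive_evens (start : Int) (end_ : Int) : Prop :=
  end_ < start ∨ 1 ≤ start
instance (start : Int) (end_ : Int) : Decidable (Pre_find_max_consecutive_evens start end_) := by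
  unfold Pre_find_max_consecutive_evens; infer_instance

def pvWitness_find_max_consecutive_evens : Int × Int := (1, 6)

def Spec_find_max_consecutive_evens (start : Int) (end_ : Int) (out : List Int) : Prop :=
  out = find_max_consecutive_evens_alt start end_
instance (start : Int) (end_ : Int) (out : List Int) : Decidable (Spec_find_max_consecutive_evens start end_ out) := by
  unfold Spec_find_max_consecutive_evens; infer_instance

-- ===== CLAIM (what is proved, stated in full; the proofs are below) =====
def Claim_equal_find_max_consecutive_evens : Prop := ∀ (start : Int) (end_ : Int), Dom_find_max_consecutive_evens start end_ → Pre_find_max_consecutive_evens start end_ → Spec_find_max_consecutive_evens start end_ (find_max_consecutive_evens start end_)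

-- ===== LEMMAS AND PROOFS =====

-- v2strip on an even nonzero number: one factor of two stripped
lemma v2strip_even {n : Int} (h0 : n ≠ 0) (h2 : PySem.Int.mod n 2 = 0) :
    v2strip n = ((v2strip (PySem.Int.floordiv n 2)).1 + 1, (v2strip (PySem.Int.floordiv n 2)).2) := by
  rw [v2strip]
  rw [dif_pos ⟨h0, h2⟩]

lemma v2strip_odd {n : Int} (h2 : PySem.Int.mod n 2 ≠ 0) : v2strip n = (0, n) := by
  rw [v2strip]
  rw [dif_neg (by tauto)]

-- key invariant: scanning port A's (fueled) sequence from n with pending run `cur`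
-- equals port B's block walk with the same fuel, for EVERY fuel
lemma collatzAux_zero (n : Int) : collatzAux 0 n = [] := by
  rw [collatzAux]; split <;> rfl

lemma collatzAux_succ (f : Nat) (n : Int) (h : n ≠ 1) :
    collatzAux (f + 1) n =
      (let n' := if PySem.Int.mod n 2 = 0 then PySem.Int.floordiv n 2 else 3 * n + 1
       n' :: collatzAux f n') := by
  rw [collatzAux, if_neg h]

lemma collatzAux_one (f : Nat) : collatzAux f 1 = [] := by
  rw [collatzAux.eq_def]; simp

lemma bGo_one (fuel : Nat) (i : Int) (st : Int × Int) : bGo fuel 1 i st = st := by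
  rw [bGo]; simp

lemma bGo_ne (fuel : Nat) (m i : Int) (st : Int × Int) (h : m ≠ 1) :
    bGo fuel m i st =
      (let r := v2strip (3 * m + 1)
       if fuel < r.1 + 1 then st
       else bGo (fuel - (r.1 + 1)) r.2 i (flushB i (r.1 : Int) st)) := by
  rw [bGo, if_neg h]
  by_cases hc : fuel < (v2strip (3 * m + 1)).1 + 1 <;> simp [hc]

lemma stepA_even (i cur : Int) (st : Int × Int) (n : Int) (h : PySem.Int.mod n 2 = 0) :
    stepA i (st.1, st.2, cur) n = (st.1, st.2, cur + 1) := by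
  unfold stepA
  rw [if_pos h]

-- A's loop body at an odd element flushes the pending run, exactly flushB
lemma stepA_odd (i cur : Int) (st : Int × Int) (n : Int) (h : PySem.Int.mod n 2 ≠ 0) :
    stepA i (st.1, st.2, cur) n = ((flushB i cur st).1, (flushB i cur st).2, 0) := by
  unfold stepA flushB
  rw [if_neg h]
  split_ifs <;> rfl

lemma mod_one_two : PySem.Int.mod 1 2 = 1 := by decide

-- key invariant: scanning port A's (fueled) sequence from n with pending run `cur`
-- equals port B's block walk with the same fuel, for EVERY fuel
lemma key (fuel : Nat) : ∀ (n : Int), 1 ≤ n → ∀ (i cur : Int) (st : Int × Int),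
    (fun s => ((s.1, s.2.1) : Int × Int))
        ((collatz_sequence fuel n).foldl (stepA i) (st.1, st.2, cur))
    = (let r := v2strip n
       if fuel < r.1 then st
       else bGo (fuel - r.1) r.2 i (flushB i ((r.1 : Int) + cur) st)) := by
  induction fuel with
  | zero =>
    intro n hn i cur st
    by_cases hmod : PySem.Int.mod n 2 = 0
    · have h0 : n ≠ 0 := by omega
      rw [v2strip_even h0 hmod]
      simp only [collatz_sequence, collatzAux_zero, List.foldl_cons, List.foldl_nil,
        stepA_even i cur st n hmod]
      simp
    · rw [v2strip_odd hmod]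
      simp only [collatz_sequence, collatzAux_zero, List.foldl_cons, List.foldl_nil,
        stepA_odd i cur st n hmod]
      by_cases hn1 : n = 1
      · subst hn1
        simp [bGo_one]
      · rw [bGo_ne _ _ _ _ hn1]
        simp
  | succ f ih =>
    intro n hn i cur st
    by_cases hmod : PySem.Int.mod n 2 = 0
    · have h0 : n ≠ 0 := by omega
      have hn1 : n ≠ 1 := by
        intro h; rw [h, mod_one_two] at hmod; exact absurd hmod (by decide)
      have hn2 : 1 ≤ PySem.Int.floordiv n 2 := by
        rw [PySem.Int.floordiv_eq_ediv_of_pos (by omega)]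
        obtain ⟨k, hk⟩ := (PySem.Int.mod_eq_zero_iff_dvd n 2).mp hmod
        subst hk
        rw [Int.mul_ediv_cancel_left _ (by omega)]
        omega
      rw [v2strip_even h0 hmod]
      have hd : (2 : Int) ∣ n := (PySem.Int.mod_eq_zero_iff_dvd n 2).mp hmod
      rw [show collatz_sequence (f + 1) n
            = n :: PySem.Int.floordiv n 2 :: collatzAux f (PySem.Int.floordiv n 2) by
        simp [collatz_sequence, collatzAux_succ f n hn1, hd]]
      simp only [List.foldl_cons, stepA_even i cur st n hmod]
      have h2 := ih (PySem.Int.floordiv n 2) hn2 i (cur + 1) st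
      simp only [collatz_sequence, List.foldl_cons] at h2
      rw [h2]
      have hcast : ((((v2strip (PySem.Int.floordiv n 2)).1 + 1 : Nat) : Int)) + cur
          = ((v2strip (PySem.Int.floordiv n 2)).1 : Int) + (cur + 1) := by
        push_cast; ring
      simp only [hcast]
      by_cases hf : f < (v2strip (PySem.Int.floordiv n 2)).1
      · rw [if_pos hf, if_pos (by omega)]
      · rw [if_neg hf, if_neg (by omega)]
        congr 1
        omega
    · rw [v2strip_odd hmod]
      by_cases hn1 : n = 1
      · subst hn1
        simp only [collatz_sequence, collatzAux_one, List.foldl_cons, List.foldl_nil,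
          stepA_odd i cur st 1 hmod]
        simp [bGo_one]
      · have hd : ¬ (2 : Int) ∣ n := fun hdvd =>
          hmod ((PySem.Int.mod_eq_zero_iff_dvd n 2).mpr hdvd)
        rw [show collatz_sequence (f + 1) n
              = n :: (3 * n + 1) :: collatzAux f (3 * n + 1) by
          simp [collatz_sequence, collatzAux_succ f n hn1, hd]]
        simp only [List.foldl_cons, stepA_odd i cur st n hmod]
        have hpos : (1 : Int) ≤ 3 * n + 1 := by omega
        have h2 := ih (3 * n + 1) hpos i 0 (flushB i cur st)
        simp only [collatz_sequence, List.foldl_cons] at h2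
        rw [h2]
        rw [bGo_ne _ _ _ _ hn1]
        simp only [Nat.sub_zero, Int.natCast_zero, zero_add, add_zero,
          Nat.not_lt_zero, if_false]
        by_cases hf : f < (v2strip (3 * n + 1)).1
        · rw [if_pos hf, if_pos (by omega)]
        · rw [if_neg hf, if_neg (by omega)]
          congr 1
          omega

-- the two per-i inner computations agree (cur = 0 at the start of each i)
lemma inner_eq (i : Int) (hi : 1 ≤ i) (st : Int × Int) :
    (fun s => ((s.1, s.2.1) : Int × Int))
        ((collatz_sequence collatzFuel i).foldl (stepA i) (st.1, st.2, 0))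
    = (let r := v2strip i
       if collatzFuel < r.1 then st
       else bGo (collatzFuel - r.1) r.2 i (flushB i (r.1 : Int) st)) := by
  have h := key collatzFuel i hi i 0 st
  simpa using h

-- ===== VERDICT (by name: the statement is the Claim_ definition above) =====
theorem find_max_consecutive_evens_spec : Claim_equal_find_max_consecutive_evens := by
  intro start end_ _hdom hpre
  unfold Spec_find_max_consecutive_evens
  unfold find_max_consecutive_evens find_max_consecutive_evens_alt
  rcases hpre with h | h
  · rw [PySem.List.pyRange_one_eq_nil (by omega)]
    simp
  · have hfold :
        (PySem.List.pyRange start (end_ + 1) 1).foldl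
          (fun st i =>
            let s := (collatz_sequence collatzFuel i).foldl (stepA i) (st.1, st.2, 0)
            ((s.1, s.2.1) : Int × Int))
          (0, 0)
      = (PySem.List.pyRange start (end_ + 1) 1).foldl
          (fun st i =>
            let r := v2strip i
            if collatzFuel < r.1 then st
            else bGo (collatzFuel - r.1) r.2 i (flushB i (r.1 : Int) st))
          (0, 0) := by
      apply PySem.List.foldl_congr_mem
      intro acc x hx
      have hx1 : 1 ≤ x := by
        have := (PySem.List.mem_pyRange_one.mp hx).1
        omega
      simpa using inner_eq x hx1 acc
    simp only [hfold]
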